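-- pv_equiv track=rewrite | github.com/Mihkel-J-K/Python | Proge lõpukursus/Exam example.py | unique_dict_items
-- ===== SOURCE A (Python) =====
-- def unique_dict_items(dict1: dict, dict2: dict) -> dict:
--     answer = {}
--     for i in dict1.keys():
--         if i not in dict2.keys():
--             answer[i] = dict1[i]
--     for i in dict2.keys():
--         if i not in dict1.keys():
--             answer[i] = dict2[i]
--     return(answer)
-- ===== SOURCE B (Python) =====
-- def unique_dict_items(dict1: dict, dict2: dict) -> dict:
--     # Frequency-count algorithm: a key belongs to exactly one dict iff it
--     # occurs exactly once among the keys of both dicts.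
--     count = {}
--     for k in dict1:
--         count[k] = count.get(k, 0) + 1
--     for k in dict2:
--         count[k] = count.get(k, 0) + 1
--     return {k: v for d in (dict1, dict2) for k, v in d.items() if count[k] == 1}
-- ===== Notes on version B (the rewrite author's own statement) =====
-- stated objective: alternative
-- what changed: A keeps keys by testing each key's membership in the other dict; B uses a frequency-count algorithm: it builds one occurrence counter over the keys of both dicts and keeps exactly the items whose key occurs once, with no cross-dict membership test at all.
import Mathlib
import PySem

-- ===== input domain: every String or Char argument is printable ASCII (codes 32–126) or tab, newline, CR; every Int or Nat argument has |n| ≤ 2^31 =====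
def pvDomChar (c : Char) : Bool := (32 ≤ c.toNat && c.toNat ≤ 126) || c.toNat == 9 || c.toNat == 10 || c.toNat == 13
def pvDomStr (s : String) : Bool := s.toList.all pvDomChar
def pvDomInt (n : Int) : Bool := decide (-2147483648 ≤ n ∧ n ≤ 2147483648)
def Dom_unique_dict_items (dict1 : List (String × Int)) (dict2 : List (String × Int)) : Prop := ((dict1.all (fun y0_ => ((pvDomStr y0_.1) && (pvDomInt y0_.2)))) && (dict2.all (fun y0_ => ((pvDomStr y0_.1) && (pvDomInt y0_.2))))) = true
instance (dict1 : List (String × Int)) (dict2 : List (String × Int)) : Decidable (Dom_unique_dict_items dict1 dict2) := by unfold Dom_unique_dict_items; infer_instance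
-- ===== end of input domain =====

-- B replaces A's per-key membership tests in the other dict by a frequency count of the
-- keys of both dicts, keeping exactly the items whose key occurs once; objective:
-- alternative algorithm (same asymptotic cost).

-- ===== PORT A =====
-- The dict arguments arrive as association lists (insertion order); Dict.mk views them
-- as the Python dicts. `dict1[i]` with i drawn from dict1.keys() cannot raise, so it is
-- ported as getD with an unused default — exact under Pre_ (unique keys per dict).
def unique_dict_items (dict1 : List (String × Int)) (dict2 : List (String × Int)) : List (String × Int) :=
  let d1 : PySem.Dict String Int := PySem.Dict.mk dict1
  let d2 : PySem.Dict String Int := PySem.Dict.mk dict2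
  let answer : PySem.Dict String Int := PySem.Dict.empty
  let answer := d1.keys.foldl (fun ans i =>
    if !(d2.keys.contains i) then ans.insert i (d1.getD i 0) else ans) answer
  let answer := d2.keys.foldl (fun ans i =>
    if !(d1.keys.contains i) then ans.insert i (d2.getD i 0) else ans) answer
  answer.items

-- ===== PORT B =====
-- `count.get(k, 0) + 1` stored back is exactly insert k (getD k 0 + 1); `count[k]`
-- in the comprehension is ported as getD (the key is always present, so exact).
def unique_dict_items_alt (dict1 : List (String × Int)) (dict2 : List (String × Int)) : List (String × Int) :=
  let count : PySem.Dict String Int :=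
    (dict1.map Prod.fst).foldl (fun c k => c.insert k (c.getD k 0 + 1)) PySem.Dict.empty
  let count : PySem.Dict String Int :=
    (dict2.map Prod.fst).foldl (fun c k => c.insert k (c.getD k 0 + 1)) count
  ((dict1 ++ dict2).foldl
      (fun d p => if count.getD p.1 0 == 1 then d.insert p.1 p.2 else d)
      (PySem.Dict.empty : PySem.Dict String Int)).items

-- ===== PRECONDITION & SPEC =====
-- The arguments encode Python dicts, which cannot contain a key twice: Pre_ requires the
-- keys within each association list to be distinct (every dict the Python A accepts
-- satisfies it; Pre_ excludes no input A returns on).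
def Pre_unique_dict_items (dict1 : List (String × Int)) (dict2 : List (String × Int)) : Prop :=
  (dict1.map Prod.fst).Nodup ∧ (dict2.map Prod.fst).Nodup
instance (dict1 : List (String × Int)) (dict2 : List (String × Int)) : Decidable (Pre_unique_dict_items dict1 dict2) := by unfold Pre_unique_dict_items; infer_instance
def pvWitness_unique_dict_items : (List (String × Int)) × (List (String × Int)) :=
  ([("a", 1), ("b", 2)], [("b", 9), ("c", 3)])

def Spec_unique_dict_items (dict1 : List (String × Int)) (dict2 : List (String × Int)) (out : List (String × Int)) : Prop := out = unique_dict_items_alt dict1 dict2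
instance (dict1 : List (String × Int)) (dict2 : List (String × Int)) (out : List (String × Int)) : Decidable (Spec_unique_dict_items dict1 dict2 out) := by unfold Spec_unique_dict_items; infer_instance

-- ===== CLAIM (what is proved, stated in full; the proofs are below) =====
def Claim_equal_unique_dict_items : Prop := ∀ (dict1 : List (String × Int)) (dict2 : List (String × Int)), Dom_unique_dict_items dict1 dict2 → Pre_unique_dict_items dict1 dict2 → Spec_unique_dict_items dict1 dict2 (unique_dict_items dict1 dict2)

-- ===== LEMMAS AND PROOFS =====

-- the counter built by B's two loops counts each key's occurrences across both key lists
theorem count_getD (dict1 dict2 : List (String × Int)) (k : String) :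
    (((dict2.map Prod.fst).foldl (fun c k => c.insert k (c.getD k 0 + 1))
        ((dict1.map Prod.fst).foldl (fun c k => c.insert k (c.getD k 0 + 1))
          (PySem.Dict.empty : PySem.Dict String Int))).getD k 0)
      = ((dict1.map Prod.fst).count k : Int) + ((dict2.map Prod.fst).count k : Int) := by
  rw [PySem.Dict.getD_foldl_insert_add_one, PySem.Dict.getD_foldl_insert_add_one]
  simp [PySem.Dict.getD]

theorem q_left (dict1 dict2 : List (String × Int)) (k : String)
    (h1 : (dict1.map Prod.fst).Nodup) (hk : k ∈ dict1.map Prod.fst) :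
    ((((dict2.map Prod.fst).foldl (fun c k => c.insert k (c.getD k 0 + 1))
        ((dict1.map Prod.fst).foldl (fun c k => c.insert k (c.getD k 0 + 1))
          (PySem.Dict.empty : PySem.Dict String Int))).getD k 0) == 1)
      = (!((dict2.map Prod.fst).contains k)) := by
  rw [Bool.eq_iff_iff, count_getD]
  have hc1 : (dict1.map Prod.fst).count k = 1 := List.count_eq_one_of_mem h1 hk
  simp only [hc1, beq_iff_eq, Bool.not_eq_true', Bool.eq_false_iff, ne_eq,
    List.contains_eq_mem, decide_eq_true_eq, ← List.count_eq_zero]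
  omega

theorem q_right (dict1 dict2 : List (String × Int)) (k : String)
    (h2 : (dict2.map Prod.fst).Nodup) (hk : k ∈ dict2.map Prod.fst) :
    ((((dict2.map Prod.fst).foldl (fun c k => c.insert k (c.getD k 0 + 1))
        ((dict1.map Prod.fst).foldl (fun c k => c.insert k (c.getD k 0 + 1))
          (PySem.Dict.empty : PySem.Dict String Int))).getD k 0) == 1)
      = (!((dict1.map Prod.fst).contains k)) := by
  rw [Bool.eq_iff_iff, count_getD]
  have hc2 : (dict2.map Prod.fst).count k = 1 := List.count_eq_one_of_mem h2 hk
  simp only [hc2, beq_iff_eq, Bool.not_eq_true', Bool.eq_false_iff, ne_eq,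
    List.contains_eq_mem, decide_eq_true_eq, ← List.count_eq_zero]
  omega

theorem side_eq (dicta dictb : List (String × Int))
    (ha : (dicta.map Prod.fst).Nodup) :
    ((dicta.map Prod.fst).filter (fun i => !((dictb.map Prod.fst).contains i))).map
        (fun i => (i, (PySem.Dict.mk dicta).getD i 0))
      = dicta.filter (fun p => !((dictb.map Prod.fst).contains p.1)) := by
  rw [List.filter_map, List.map_map]
  have h3 : ∀ p ∈ dicta.filter ((fun i => !((dictb.map Prod.fst).contains i)) ∘ Prod.fst),
      ((fun i => (i, (PySem.Dict.mk dicta).getD i 0)) ∘ Prod.fst) p = id p := by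
    intro p hp
    have hp' : p ∈ dicta := List.mem_of_mem_filter hp
    have hv := PySem.Dict.getD_of_mem_items (PySem.Dict.mk dicta) (k := p.1) (v := p.2)
      (by simpa using hp') (by simpa using ha) 0
    simp [hv]
  rw [List.map_congr_left h3, List.map_id]
  rfl

theorem unique_dict_items_eq (dict1 dict2 : List (String × Int))
    (h1 : (dict1.map Prod.fst).Nodup) (h2 : (dict2.map Prod.fst).Nodup) :
    unique_dict_items dict1 dict2 = unique_dict_items_alt dict1 dict2 := by
  have hkeys : ∀ l : List (String × Int), (PySem.Dict.mk l).keys = l.map Prod.fst := fun _ => rfl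
  simp only [unique_dict_items, unique_dict_items_alt]
  rw [PySem.List.foldl_if_eq_foldl_filter, PySem.List.foldl_if_eq_foldl_filter,
      PySem.List.foldl_if_eq_foldl_filter]
  simp only [hkeys]
  set cnt : PySem.Dict String Int :=
    (dict2.map Prod.fst).foldl (fun c k => c.insert k (c.getD k 0 + 1))
      ((dict1.map Prod.fst).foldl (fun c k => c.insert k (c.getD k 0 + 1))
        (PySem.Dict.empty : PySem.Dict String Int)) with hcnt
  set p1 : String → Bool := fun i => !((dict2.map Prod.fst).contains i) with hp1def
  set p2 : String → Bool := fun i => !((dict1.map Prod.fst).contains i) with hp2def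
  set q : String × Int → Bool := fun p => cnt.getD p.1 0 == 1 with hqdef
  set A1 : PySem.Dict String Int :=
    List.foldl (fun ans i => ans.insert i ((PySem.Dict.mk dict1).getD i 0)) PySem.Dict.empty
      ((dict1.map Prod.fst).filter p1) with hA1def
  -- keys accumulated by the first loop
  have hA1keys : A1.keys = PySem.Set.ofList ((dict1.map Prod.fst).filter p1) := by
    rw [hA1def, PySem.Dict.keys_foldl_insert, PySem.Dict.keys_empty, PySem.Set.update_nil_left]
  -- the second loop's keys are fresh for A1
  have hfresh2 : ∀ a ∈ (dict2.map Prod.fst).filter p2, A1.contains a = false := by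
    intro a ha
    have hmem := List.mem_filter.mp ha
    have hnot1 : a ∉ dict1.map Prod.fst := by
      have := hmem.2
      simp [hp2def] at this
      simpa using this
    apply Bool.eq_false_iff.mpr
    intro hc
    have := (PySem.Dict.contains_iff_mem_keys A1 a).mp hc
    rw [hA1keys] at this
    exact hnot1 (List.mem_of_mem_filter ((PySem.Set.mem_ofList _ _).mp this))
  have hnodup2 : (((dict2.map Prod.fst).filter p2).map (fun i => i)).Nodup := by
    simpa using h2.filter p2
  rw [PySem.Dict.items_foldl_insert_fresh ((dict2.map Prod.fst).filter p2) (fun i => i)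
        (fun i => (PySem.Dict.mk dict2).getD i 0) A1 hfresh2 hnodup2]
  have hfresh1 : ∀ a ∈ (dict1.map Prod.fst).filter p1, (PySem.Dict.empty : PySem.Dict String Int).contains a = false :=
    fun a _ => PySem.Dict.contains_empty a
  have hnodup1 : (((dict1.map Prod.fst).filter p1).map (fun i => i)).Nodup := by
    simpa using h1.filter p1
  rw [hA1def, PySem.Dict.items_foldl_insert_fresh ((dict1.map Prod.fst).filter p1) (fun i => i)
        (fun i => (PySem.Dict.mk dict1).getD i 0) PySem.Dict.empty hfresh1 hnodup1]
  -- B's filtered predicate agrees with A's membership tests on each side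
  have hc1 : List.filter q dict1 = List.filter (fun p => p1 p.1) dict1 := by
    apply List.filter_congr
    intro x hx
    rw [hqdef, hp1def, hcnt]
    exact q_left dict1 dict2 x.1 h1 (List.mem_map_of_mem hx)
  have hc2 : List.filter q dict2 = List.filter (fun p => p2 p.1) dict2 := by
    apply List.filter_congr
    intro x hx
    rw [hqdef, hp2def, hcnt]
    exact q_right dict1 dict2 x.1 h2 (List.mem_map_of_mem hx)
  -- B's loop inserts fresh distinct keys too
  have hfreshB : ∀ a ∈ (dict1 ++ dict2).filter q, (PySem.Dict.empty : PySem.Dict String Int).contains a.1 = false :=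
    fun a _ => PySem.Dict.contains_empty a.1
  have hnodupB : (((dict1 ++ dict2).filter q).map Prod.fst).Nodup := by
    rw [List.filter_append, List.map_append, hc1, hc2]
    refine List.Nodup.append ?_ ?_ ?_
    · exact ((List.filter_sublist).map Prod.fst).nodup h1
    · exact ((List.filter_sublist).map Prod.fst).nodup h2
    · intro a ha hb
      obtain ⟨pa, hpa, rfl⟩ := List.mem_map.mp ha
      obtain ⟨pb, hpb, hfb⟩ := List.mem_map.mp hb
      have h1a := List.mem_filter.mp hpa
      have h2b := List.mem_filter.mp hpb
      have hmem2 : pa.1 ∈ dict2.map Prod.fst := by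
        rw [← hfb]; exact List.mem_map_of_mem h2b.1
      have := h1a.2
      simp [hp1def, hmem2] at this
  rw [PySem.Dict.items_foldl_insert_fresh ((dict1 ++ dict2).filter q) Prod.fst Prod.snd
        PySem.Dict.empty hfreshB hnodupB]
  simp only [show (PySem.Dict.empty : PySem.Dict String Int).items = ([] : List (String × Int)) from rfl,
    List.nil_append]
  simp only [Prod.mk.eta, List.map_id']
  rw [List.filter_append, hc1, hc2, ← side_eq dict1 dict2 h1, ← side_eq dict2 dict1 h2]

-- ===== VERDICT (by name: the statement is the Claim_ definition above) =====
theorem unique_dict_items_spec : Claim_equal_unique_dict_items := by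
  intro d1 d2 _ hpre
  unfold Spec_unique_dict_items
  exact unique_dict_items_eq d1 d2 hpre.1 hpre.2
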